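-- pv_equiv track=rewrite | github.com/Nikkuniku/AtcoderProgramming | ARC/ARC163/a.py | solve
-- ===== SOURCE A (Python) =====
-- from collections import deque
--
-- def solve(n, s):
--
--     P = list(s)
--     Q = deque()
--     res = False
--     for _ in range(n-1):
--         Q.appendleft(P.pop())
--         tmp_p = ''.join(P)
--         tmp_q = ''.join(Q)
--         if tmp_p < tmp_q:
--             res = True
--     return res
-- ===== SOURCE B (Python) =====
-- def z_array(s):
--     L = len(s)
--     z = [L]
--     l = 0
--     r = 0
--     for i in range(1, L):
--         zi = min(r - i, z[i - l]) if i < r else 0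
--         while i + zi < L and s[zi] == s[i + zi]:
--             zi += 1
--         z.append(zi)
--         if i + zi > r:
--             l = i
--             r = i + zi
--     return z
--
--
-- def solve(n, s):
--     L = len(s)
--     if L == 0 or n <= 1:
--         return False
--     z = z_array(s)
--     lo = max(L - n + 1, 0)
--     for j in range(lo, L):
--         l = min(z[j], j)
--         if (l == j and j < L - j) or (l < j and l < L - j and s[l] < s[j + l]):
--             return True
--     return False
-- ===== Notes on version B (the rewrite author's own statement) =====
-- stated objective: faster
-- what changed: B precomputes the Z-array (longest common prefix of s with each of its suffixes) in linear time and decides each prefix<suffix split in O(1) from z[j] plus a single character comparison, instead of A's per-split deque rebuild and full string comparison.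
import Mathlib
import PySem

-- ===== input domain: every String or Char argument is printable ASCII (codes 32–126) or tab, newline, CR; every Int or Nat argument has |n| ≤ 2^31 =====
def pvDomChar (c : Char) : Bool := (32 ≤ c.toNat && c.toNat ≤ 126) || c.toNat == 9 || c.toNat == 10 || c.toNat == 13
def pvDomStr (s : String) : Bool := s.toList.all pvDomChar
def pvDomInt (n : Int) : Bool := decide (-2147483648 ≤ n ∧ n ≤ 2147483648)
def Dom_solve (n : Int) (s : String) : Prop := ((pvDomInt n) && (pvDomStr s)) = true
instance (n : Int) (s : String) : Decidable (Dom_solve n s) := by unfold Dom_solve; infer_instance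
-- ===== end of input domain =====

-- B precomputes the Z-array (lcp of s with each of its suffixes) in linear time and decides
-- each prefix<suffix split in O(1) from z[j] plus one character comparison, instead of A's
-- per-split deque rebuild and full string comparison (objective: faster, asymptotic).

-- ===== PORT A =====
-- state: some (P, Q, res); none = the IndexError raised by P.pop() on an empty P.
-- tmp_p < tmp_q: Python's str '<' is '<' on List Char (PYSEM: str COMPARISON), and
-- ''.join(P) for P the list of chars is exactly the string with those chars, so the
-- comparison of the two joins is the List Char comparison P' < Q'.
def solveStep (st : Option (List Char × List Char × Bool)) : Option (List Char × List Char × Bool) :=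
  match st with
  | none => none
  | some (P, Q, res) =>
    match PySem.List.pop? P (-1) with        -- P.pop()
    | none => none                            -- IndexError
    | some (x, P') =>
      let Q' := x :: Q                        -- Q.appendleft(x)
      some (P', Q', if P' < Q' then true else res)   -- tmp_p < tmp_q

def solve (n : Int) (s : String) : Bool :=
  ((PySem.List.pyRange 0 (n - 1) 1).foldl (fun st _ => solveStep st)
      (some (s.toList, ([] : List Char), false))).elim
    false                                     -- unreachable under Pre_solve (IndexError)
    (fun st => st.2.2)                        -- return res

-- ===== PORT B =====
-- the inner 'while i + zi < L and s[zi] == s[i + zi]: zi += 1' of z_array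
def zext (cs : List Char) (i zi : Nat) : Nat :=
  if h : i + zi < cs.length ∧ cs.getD zi default = cs.getD (i + zi) default then
    zext cs i (zi + 1)
  else zi
termination_by cs.length - (i + zi)
decreasing_by obtain ⟨h1, _⟩ := h; omega

-- one iteration of z_array's for-loop; state = (z, l, r)
def zstep (cs : List Char) (st : List Nat × Nat × Nat) (i : Nat) : List Nat × Nat × Nat :=
  let z := st.1
  let l := st.2.1
  let r := st.2.2
  let seed := if i < r then min (r - i) (z.getD (i - l) 0) else 0   -- zi = min(r-i, z[i-l]) if i<r else 0
  let zi := zext cs i seed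
  (z ++ [zi], if r < i + zi then i else l, if r < i + zi then i + zi else r)

def zarray (cs : List Char) : List Nat :=
  ((List.range' 1 (cs.length - 1)).foldl (zstep cs) ([cs.length], 0, 0)).1

def solve_alt (n : Int) (s : String) : Bool :=
  let cs := s.toList
  let L := cs.length
  if L = 0 ∨ n ≤ 1 then false
  else
    let z := zarray cs
    let lo := (max ((L : Int) - n + 1) 0).toNat
    (List.range' lo (L - lo)).any (fun j =>
      let l := min (z.getD j 0) j
      (l == j && decide (j < L - j)) ||
      (decide (l < j) && decide (l < L - j) &&
        decide (cs.getD l default < cs.getD (j + l) default)))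

-- ===== PRECONDITION & SPEC =====
-- Pre_ excludes exactly the inputs where A raises IndexError (it pops n-1 > len(s) characters).
def Pre_solve (n : Int) (s : String) : Prop := n - 1 ≤ (s.toList.length : Int)
instance (n : Int) (s : String) : Decidable (Pre_solve n s) := by unfold Pre_solve; infer_instance
def pvWitness_solve : Int × String := (3, "bca")

def Spec_solve (n : Int) (s : String) (out : Bool) : Prop := out = solve_alt n s
instance (n : Int) (s : String) (out : Bool) : Decidable (Spec_solve n s out) := by unfold Spec_solve; infer_instance

-- ===== CLAIM (what is proved, stated in full; the proofs are below) =====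
def Claim_equal_solve : Prop := ∀ (n : Int) (s : String), Dom_solve n s → Pre_solve n s → Spec_solve n s (solve n s)

-- ===== LEMMAS AND PROOFS =====

-- length of the longest common prefix of two lists
def lcpL : List Char → List Char → Nat
  | a :: as, b :: bs => if a = b then lcpL as bs + 1 else 0
  | _, _ => 0

theorem lcpL_le_right : ∀ (a b : List Char), lcpL a b ≤ b.length := by
  intro a
  induction a with
  | nil => intro b; cases b <;> simp [lcpL]
  | cons x as ih =>
    intro b
    cases b with
    | nil => simp [lcpL]
    | cons y bs =>
      simp only [lcpL]
      split_ifs with h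
      · simpa using ih bs
      · simp

theorem lcpL_getD (d : Char) : ∀ (a b : List Char) (t : Nat), t < lcpL a b →
    a.getD t d = b.getD t d := by
  intro a
  induction a with
  | nil => intro b t ht; cases b <;> simp [lcpL] at ht
  | cons x as ih =>
    intro b t ht
    cases b with
    | nil => simp [lcpL] at ht
    | cons y bs =>
      simp only [lcpL] at ht
      split_ifs at ht with h
      · cases t with
        | zero => simpa using h
        | succ t => simpa using ih bs t (by omega)
      · omega

theorem lcpL_mismatch (d : Char) : ∀ (a b : List Char), lcpL a b < a.length →
    lcpL a b < b.length → a.getD (lcpL a b) d ≠ b.getD (lcpL a b) d := by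
  intro a
  induction a with
  | nil => intro b h1 _; simp at h1
  | cons x as ih =>
    intro b h1 h2
    cases b with
    | nil => simp at h2
    | cons y bs =>
      by_cases h : x = y
      · simp only [lcpL, if_pos h] at h1 h2 ⊢
        simpa using ih bs (by simpa using h1) (by simpa using h2)
      · simp only [lcpL, if_neg h] at h1 h2 ⊢
        simpa using h

theorem lcpL_self (a : List Char) : lcpL a a = a.length := by
  induction a with
  | nil => simp [lcpL]
  | cons x as ih => simp [lcpL, ih]

theorem lcpL_ge (d : Char) : ∀ (a b : List Char) (k : Nat),
    (∀ t < k, a.getD t d = b.getD t d) → k ≤ a.length → k ≤ b.length → k ≤ lcpL a b := by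
  intro a
  induction a with
  | nil =>
    intro b k _ hk _
    have hk0 : k = 0 := by simpa using hk
    subst hk0
    exact Nat.zero_le _
  | cons x as ih =>
    intro b k hmatch hka hkb
    cases b with
    | nil =>
      have hk0 : k = 0 := by simpa using hkb
      subst hk0
      exact Nat.zero_le _
    | cons y bs =>
      cases k with
      | zero => simp
      | succ k =>
        have h0 : x = y := by simpa using hmatch 0 (by omega)
        simp only [lcpL, if_pos h0]
        have := ih bs k (fun t ht => by simpa using hmatch (t + 1) (by omega))
          (by simpa using hka) (by simpa using hkb)
        omega

theorem getD_drop (cs : List Char) (i t : Nat) (d : Char) :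
    (cs.drop i).getD t d = cs.getD (i + t) d := by
  simp [List.getD, List.getElem?_drop]

theorem zext_eq (cs : List Char) (i : Nat) (hi : 1 ≤ i) :
    ∀ k, k ≤ lcpL cs (cs.drop i) → zext cs i k = lcpL cs (cs.drop i) := by
  set dcp := lcpL cs (cs.drop i) with hdcp
  have hstop : zext cs i dcp = dcp := by
    rw [zext]
    rw [dif_neg]
    rintro ⟨h1, h2⟩
    have hlt1 : dcp < cs.length := by
      have := lcpL_le_right cs (cs.drop i)
      simp only [List.length_drop] at this
      omega
    have hlt2 : dcp < (cs.drop i).length := by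
      simp only [List.length_drop]; omega
    have := lcpL_mismatch default cs (cs.drop i) hlt1 hlt2
    rw [← hdcp, getD_drop] at this
    exact this h2
  have H : ∀ m k, dcp - k ≤ m → k ≤ dcp → zext cs i k = dcp := by
    intro m
    induction m with
    | zero =>
      intro k h1 h2
      have : k = dcp := by omega
      rw [this, hstop]
    | succ m ihm =>
      intro k h1 h2
      by_cases hk : k = dcp
      · rw [hk, hstop]
      · have hklt : k < dcp := by omega
        rw [zext, dif_pos]
        · exact ihm (k + 1) (by omega) (by omega)
        · constructor
          · have := lcpL_le_right cs (cs.drop i)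
            simp only [List.length_drop] at this
            omega
          · have := lcpL_getD default cs (cs.drop i) k (by omega)
            rwa [getD_drop] at this
  intro k hk
  exact H dcp k (by omega) hk

-- invariant of z_array's fold: z holds the true lcp values, (l, r) is a valid z-box
def ZInv (cs : List Char) (st : List Nat × Nat × Nat) (i : Nat) : Prop :=
  st.1.length = i ∧
  (∀ j < i, st.1.getD j 0 = lcpL cs (cs.drop j)) ∧
  st.2.1 ≤ st.2.2 ∧ st.2.2 ≤ cs.length ∧ st.2.1 < i ∧ (st.2.2 = 0 ∨ 1 ≤ st.2.1) ∧
  (∀ t, st.2.1 + t < st.2.2 → cs.getD (st.2.1 + t) default = cs.getD t default)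

theorem zstep_inv (cs : List Char) (z : List Nat) (l r i : Nat)
    (hi : 1 ≤ i) (hiL : i < cs.length) (h : ZInv cs (z, l, r) i) : ZInv cs (zstep cs (z, l, r) i) (i + 1) := by
  obtain ⟨hlen, hz, hlr, hrL, hli, hl1, hwin⟩ := h
  simp only at hlen hz hlr hrL hli hl1 hwin
  have hseed : (if i < r then min (r - i) (z.getD (i - l) 0) else 0) ≤ lcpL cs (cs.drop i) := by
    split_ifs with hir
    · have hil : i - l < i := by omega -- i < r so r ≠ 0 so 1 ≤ l (hl1)
      have hzil : z.getD (i - l) 0 = lcpL cs (cs.drop (i - l)) := hz _ hil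
      have hmin1 : min (r - i) (z.getD (i - l) 0) ≤ r - i := Nat.min_le_left _ _
      have hmin2 : min (r - i) (z.getD (i - l) 0) ≤ z.getD (i - l) 0 := Nat.min_le_right _ _
      apply lcpL_ge default
      · intro t ht
        have ht1 : t < r - i := by omega
        have ht2 : t < lcpL cs (cs.drop (i - l)) := by rw [← hzil]; omega
        have e1 : cs.getD t default = cs.getD ((i - l) + t) default := by
          have := lcpL_getD default cs (cs.drop (i - l)) t ht2
          rwa [getD_drop] at this
        have e2 : cs.getD (l + ((i - l) + t)) default = cs.getD ((i - l) + t) default :=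
          hwin ((i - l) + t) (by omega)
        rw [getD_drop, e1, ← e2, show l + ((i - l) + t) = i + t by omega]
      · omega
      · simp only [List.length_drop]; omega
    · exact Nat.zero_le _
  have hzi : zext cs i (if i < r then min (r - i) (z.getD (i - l) 0) else 0) =
      lcpL cs (cs.drop i) := zext_eq cs i hi _ hseed
  have hdL : lcpL cs (cs.drop i) ≤ cs.length - i := by
    have := lcpL_le_right cs (cs.drop i)
    simpa using this
  simp only [zstep, ZInv, hzi]
  refine ⟨by simp [hlen], ?_, ?_, ?_, ?_, ?_, ?_⟩
  · intro j hj
    by_cases hji : j < i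
    · rw [List.getD_append z [lcpL cs (cs.drop i)] 0 j (by omega)]
      exact hz j hji
    · have hji' : j = i := by omega
      rw [hji', ← hlen]
      simp [List.getD]
  · split_ifs <;> omega
  · split_ifs <;> omega
  · split_ifs <;> omega
  · split_ifs <;> omega
  · split_ifs with hupd
    · intro t ht
      have ht' : t < lcpL cs (cs.drop i) := by omega
      have := lcpL_getD default cs (cs.drop i) t ht'
      rw [getD_drop] at this
      exact this.symm
    · exact hwin

theorem zfold_inv (cs : List Char) : ∀ (m a : Nat) (st : List Nat × Nat × Nat),
    1 ≤ a → a + m ≤ cs.length → ZInv cs st a →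
    ZInv cs ((List.range' a m).foldl (zstep cs) st) (a + m) := by
  intro m
  induction m with
  | zero => intro a st _ _ h; simpa using h
  | succ m ihm =>
    intro a st ha hm h
    rw [List.range'_succ, List.foldl_cons]
    obtain ⟨z, l, r⟩ := st
    have := ihm (a + 1) (zstep cs (z, l, r) a) (by omega) (by omega)
      (zstep_inv cs z l r a ha (by omega) h)
    rwa [show a + 1 + m = a + (m + 1) by omega] at this

theorem zarray_spec (cs : List Char) (h1 : 1 ≤ cs.length) :
    ∀ j < cs.length, (zarray cs).getD j 0 = lcpL cs (cs.drop j) := by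
  have hinit : ZInv cs ([cs.length], 0, 0) 1 := by
    unfold ZInv
    refine ⟨by simp, ?_, by simp, by simp, by simp, by simp, by intro t ht; simp at ht⟩
    intro j hj
    have : j = 0 := by omega
    subst this
    simp [List.getD, lcpL_self]
  have := zfold_inv cs (cs.length - 1) 1 ([cs.length], 0, 0) (by omega) (by omega) hinit
  rw [show 1 + (cs.length - 1) = cs.length by omega] at this
  intro j hj
  exact this.2.1 j hj

-- lexicographic '<' on lists characterised through the lcp
theorem lt_iff_lcp (d : Char) : ∀ (p q : List Char),
    p < q ↔ ((lcpL p q = p.length ∧ p.length < q.length) ∨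
      (lcpL p q < p.length ∧ lcpL p q < q.length ∧ p.getD (lcpL p q) d < q.getD (lcpL p q) d)) := by
  intro p
  induction p with
  | nil =>
    intro q
    cases q with
    | nil => simp [lcpL]
    | cons y bs => simp [lcpL, List.nil_lt_cons]
  | cons x as ih =>
    intro q
    cases q with
    | nil => simp [lcpL, List.not_lt_nil]
    | cons y bs =>
      rw [List.cons_lt_cons_iff]
      simp only [lcpL]
      split_ifs with h
      · subst h
        have hxy : ¬ x < x := lt_irrefl x
        simp only [hxy, false_or, true_and, List.length_cons]
        rw [ih bs]
        constructor
        · rintro (⟨h1, h2⟩ | ⟨h1, h2, h3⟩)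
          · exact Or.inl ⟨by omega, by omega⟩
          · exact Or.inr ⟨by omega, by omega, by simpa using h3⟩
        · rintro (⟨h1, h2⟩ | ⟨h1, h2, h3⟩)
          · exact Or.inl ⟨by omega, by omega⟩
          · exact Or.inr ⟨by omega, by omega, by simpa using h3⟩
      · simp only [List.length_cons]
        constructor
        · rintro (hxy | ⟨hxy, _⟩)
          · exact Or.inr ⟨by omega, by omega, by simpa using hxy⟩
          · exact absurd hxy h
        · rintro (⟨h1, _⟩ | ⟨_, _, h3⟩)
          · omega
          · exact Or.inl (by simpa using h3)

theorem lcpL_take : ∀ (a b : List Char) (j : Nat), lcpL (a.take j) b = min (lcpL a b) j := by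
  intro a
  induction a with
  | nil => intro b j; cases b <;> simp [lcpL]
  | cons x as ih =>
    intro b j
    cases j with
    | zero => cases b <;> simp [lcpL]
    | succ j =>
      cases b with
      | nil => simp [lcpL]
      | cons y bs =>
        simp only [List.take_succ_cons, lcpL]
        split_ifs with h
        · rw [ih bs j]; omega
        · simp

-- B's O(1) test at split j equals the prefix<suffix comparison, given the z value
theorem ztest_eq (cs : List Char) (j : Nat) (hj : j < cs.length) (z : Nat)
    (hzv : z = lcpL cs (cs.drop j)) :
    ((min z j == j && decide (j < cs.length - j)) ||
      (decide (min z j < j) && decide (min z j < cs.length - j) &&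
        decide (cs.getD (min z j) default < cs.getD (j + min z j) default))) =
    decide (cs.take j < cs.drop j) := by
  have hjle : j ≤ cs.length := by omega
  have hlcp : lcpL (cs.take j) (cs.drop j) = min z j := by
    rw [hzv, lcpL_take]
  have hlenp : (cs.take j).length = j := by simp [hjle]
  have hlenq : (cs.drop j).length = cs.length - j := by simp
  rw [Bool.eq_iff_iff]
  simp only [Bool.or_eq_true, Bool.and_eq_true, beq_iff_eq, decide_eq_true_eq]
  rw [lt_iff_lcp default (cs.take j) (cs.drop j), hlcp, hlenp, hlenq]
  constructor
  · rintro (⟨h1, h2⟩ | ⟨⟨h1, h2⟩, h3⟩)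
    · exact Or.inl ⟨h1, h2⟩
    · refine Or.inr ⟨h1, h2, ?_⟩
      have e1 : (cs.take j).getD (min z j) default = cs.getD (min z j) default := by
        rw [List.getD, List.getD, List.getElem?_take_of_lt (by omega)]
      have e2 : (cs.drop j).getD (min z j) default = cs.getD (j + min z j) default :=
        getD_drop cs j (min z j) default
      rw [e1, e2]; exact h3
  · rintro (⟨h1, h2⟩ | ⟨h1, h2, h3⟩)
    · exact Or.inl ⟨h1, h2⟩
    · refine Or.inr ⟨⟨h1, h2⟩, ?_⟩
      have e1 : (cs.take j).getD (min z j) default = cs.getD (min z j) default := by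
        rw [List.getD, List.getD, List.getElem?_take_of_lt (by omega)]
      have e2 : (cs.drop j).getD (min z j) default = cs.getD (j + min z j) default :=
        getD_drop cs j (min z j) default
      rw [← e1, ← e2]; exact h3

theorem any_congr_mem {α : Type} (l : List α) (f g : α → Bool)
    (h : ∀ x ∈ l, f x = g x) : l.any f = l.any g := by
  induction l with
  | nil => rfl
  | cons x xs ih =>
    simp only [List.any_cons]
    rw [h x (by simp), ih (fun y hy => h y (by simp [hy]))]

theorem solve_state (cs : List Char) (m : Nat) (hm : m ≤ cs.length) :
    (PySem.List.pyRange 0 (m : Int) 1).foldl (fun st _ => solveStep st)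
      (some (cs, ([] : List Char), false)) =
    some (cs.take (cs.length - m), cs.drop (cs.length - m),
      (List.range m).any (fun i =>
        decide (cs.take (cs.length - (i + 1)) < cs.drop (cs.length - (i + 1))))) := by
  induction m with
  | zero =>
      rw [PySem.List.pyRange_one_eq_nil (by omega)]
      simp
  | succ m ih =>
      have hm' : m ≤ cs.length := by omega
      have hlt : cs.length - (m + 1) < cs.length := by omega
      rw [show ((m + 1 : Nat) : Int) = (m : Int) + 1 by push_cast; ring,
          PySem.List.pyRange_one_succ_right (by omega), List.foldl_append, ih hm']
      have htake : cs.take (cs.length - m) =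
          cs.take (cs.length - (m + 1)) ++ [cs[cs.length - (m + 1)]] := by
        rw [show cs.length - m = (cs.length - (m + 1)) + 1 by omega, List.take_add_one,
            List.getElem?_eq_getElem hlt]
        rfl
      have hdrop : cs.drop (cs.length - (m + 1)) =
          cs[cs.length - (m + 1)] :: cs.drop (cs.length - m) := by
        rw [show cs.length - m = (cs.length - (m + 1)) + 1 by omega]
        exact List.drop_eq_getElem_cons hlt
      simp only [List.foldl_cons, List.foldl_nil, solveStep, htake,
        PySem.List.pop?_last, ← hdrop, List.range_succ, List.any_append, List.any_cons,
        List.any_nil]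
      simp only [Option.some.injEq, Prod.mk.injEq]
      refine ⟨trivial, trivial, ?_⟩
      by_cases h : cs.take (cs.length - (m + 1)) < cs.drop (cs.length - (m + 1)) <;>
        simp [h]

theorem solve_any_reindex (len k : Nat) (hk : k ≤ len) (p : Nat → Bool) :
    (List.range k).any (fun i => p (len - (i + 1))) =
    (List.range k).any (fun t => p (len - k + t)) := by
  rw [Bool.eq_iff_iff]
  simp only [List.any_eq_true, List.mem_range]
  constructor
  · rintro ⟨i, hi, h⟩
    exact ⟨k - 1 - i, by omega, by rwa [show len - k + (k - 1 - i) = len - (i + 1) by omega]⟩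
  · rintro ⟨t, ht, h⟩
    exact ⟨k - 1 - t, by omega, by rwa [show len - (k - 1 - t + 1) = len - k + t by omega]⟩

-- ===== VERDICT =====
theorem solve_spec : Claim_equal_solve := by
  intro n s _ hp
  unfold Pre_solve at hp
  unfold Spec_solve solve solve_alt
  set cs := s.toList with hcs
  by_cases hn : n ≤ 1
  · rw [PySem.List.pyRange_one_eq_nil (show n - 1 ≤ 0 by omega)]
    simp [hn]
  · -- 2 ≤ n, so Pre gives 1 ≤ len
    have hL : 1 ≤ cs.length := by omega
    set k : Nat := (n - 1).toNat with hk
    have hk1 : 1 ≤ k := by omega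
    have hkl : k ≤ cs.length := by omega
    have hnk : n - 1 = (k : Int) := by omega
    rw [hnk, solve_state cs k hkl]
    simp only [Option.elim]
    rw [if_neg (by rintro (h | h) <;> omega)]
    have hlo : (max ((cs.length : Int) - n + 1) 0).toNat = cs.length - k := by omega
    rw [hlo]
    have hrange : List.range' (cs.length - k) (cs.length - (cs.length - k)) =
        (List.range (cs.length - (cs.length - k))).map (fun t => cs.length - k + t) := by
      rw [List.range'_eq_map_range]
    rw [hrange, show cs.length - (cs.length - k) = k by omega, List.any_map]
    rw [solve_any_reindex cs.length k hkl (fun j => decide (cs.take j < cs.drop j))]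
    apply any_congr_mem
    intro t ht
    rw [List.mem_range] at ht
    set j := cs.length - k + t with hj
    have hjL : j < cs.length := by omega
    simp only [Function.comp]
    rw [← ztest_eq cs j hjL ((zarray cs).getD j 0) (zarray_spec cs hL j hjL)]
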